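-- pv_equiv track=rewrite | github.com/Kim-JuYong/DataStructuce_Algorithm | Algorithm/SAMSUNG/나무높이.py | solution
-- ===== SOURCE A (Python) =====
-- def solution(N, heights):
--     max_height = max(heights)
--     need_height = [max_height - h for h in heights if h != max_height]  # 나무가 자라야 하는 높이
--     sum_need_height = sum(need_height)  # 총 필요한 높이
--
--     need_odd_day = len([h for h in need_height if h % 2 == 1])  # 홀수 만큼 자라는 나무는 홀수 날에 꼭 물을 1번 줘야함
--     min_day = need_odd_day * 2 - 1  # 그래서 최소 필요한 날을 구할 수 있음
--     max_day = sum_need_height * 2 - 1  # 홀수 날에만 물을 줘서 만족하는 경우가 최대로 필요한 날임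
--
--     for day in range(min_day, max_day + 1):  # 최소 필요헌 날 ~ 최대 날짜 사이에 답이 있을 것
--         # 3일엔 짝수날 1번 홀수날 2번 , 4일엔 짝수날 2번 홀수날 2번
--         even_day = day // 2
--         if day % 2 == 0:
--             odd_day = even_day
--         else:
--             odd_day = even_day + 1
--         # 짝수 날에 높이 2 홀수 날은 높이 1 이 자란다. 이 합이 "모든 나무가 자라야 할 총 높이" 보다 크거나 같으면 조건 만족
--         if even_day * 2 + odd_day * 1 >= sum_need_height:
--             return day
--         # 왜 같을 때만이 아니라 크거나 같다 일까?? -> 물을 안줘도 되는 경우가 있기 때문! 자라야 할 높이 보다 오버 되면 물을 어느 날에 안주면 만족!!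
--     return 0
-- ===== SOURCE B (Python) =====
-- def solution(N, heights):
--     # Single pass for total need and odd-need count, then closed form for the
--     # smallest day whose watering capacity covers the total need.
--     m = max(heights)
--     total = 0
--     odd = 0
--     for h in heights:
--         need = m - h
--         total += need
--         odd += need & 1
--     if total == 0:
--         return 0
--     q, r = divmod(total, 3)
--     d0 = 2 * q + r
--     return max(d0, 2 * odd - 1)
-- ===== Notes on version B (the rewrite author's own statement) =====
-- stated objective: faster
-- what changed: A scans days one by one from min_day until the watering capacity covers the total needed growth; B computes the totals in one fold and gets the smallest sufficient day in closed form via divmod(total, 3), so the scan disappears.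
-- outside the precondition, e.g. on solution(0, []): A raises ValueError, B raises ValueError
import Mathlib
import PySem

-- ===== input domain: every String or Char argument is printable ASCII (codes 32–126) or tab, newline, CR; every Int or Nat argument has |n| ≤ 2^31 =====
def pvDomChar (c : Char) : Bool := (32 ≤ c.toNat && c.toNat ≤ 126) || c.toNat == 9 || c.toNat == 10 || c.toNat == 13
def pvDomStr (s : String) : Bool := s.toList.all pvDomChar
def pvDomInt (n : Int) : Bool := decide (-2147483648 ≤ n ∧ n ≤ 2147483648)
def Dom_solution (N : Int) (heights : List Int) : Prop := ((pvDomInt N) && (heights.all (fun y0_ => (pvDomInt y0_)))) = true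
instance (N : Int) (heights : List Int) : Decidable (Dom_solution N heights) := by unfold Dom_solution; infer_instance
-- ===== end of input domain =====

-- B replaces A's day-by-day linear scan with a single fold plus a closed form for the smallest
-- sufficient day (objective: faster — A's loop length grows with the total needed growth).


-- ===== PORT A =====
-- A's for-loop over range(min_day, max_day+1) with an early return; 0 after the loop
def solutionLoopA (S : Int) : List Int → Int
  | [] => 0
  | day :: rest =>
    let even_day := PySem.Int.floordiv day 2
    let odd_day := if PySem.Int.mod day 2 = 0 then even_day else even_day + 1
    if even_day * 2 + odd_day * 1 ≥ S then day else solutionLoopA S rest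

def solution (N : Int) (heights : List Int) : Int :=
  match PySem.List.max? heights (fun x => x) with
  | none => 0  -- Python's max() raises ValueError on empty heights; excluded by Pre_solution
  | some max_height =>
    let need_height := (heights.filter (fun h => h != max_height)).map (fun h => max_height - h)
    let sum_need_height := need_height.sum
    let need_odd_day : Int := (need_height.filter (fun h => PySem.Int.mod h 2 == 1)).length
    let min_day := need_odd_day * 2 - 1
    let max_day := sum_need_height * 2 - 1
    solutionLoopA sum_need_height (PySem.List.pyRange min_day (max_day + 1) 1)

-- ===== PORT B =====
def solution_alt (N : Int) (heights : List Int) : Int :=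
  match PySem.List.max? heights (fun x => x) with
  | none => 0  -- Python's max() raises ValueError on empty heights; excluded by Pre_solution
  | some m =>
    let acc := heights.foldl
      (fun (p : Int × Int) h => (p.1 + (m - h), p.2 + PySem.Int.band (m - h) 1)) (0, 0)
    let total := acc.1
    let odd := acc.2
    if total = 0 then 0
    else
      let q := PySem.Int.floordiv total 3
      let r := PySem.Int.mod total 3
      let d0 := 2 * q + r
      max d0 (2 * odd - 1)

-- ===== PRECONDITION & SPEC =====
-- Pre_ excludes only the empty list, on which Python's max() raises ValueError (both A and B raise).
def Pre_solution (N : Int) (heights : List Int) : Prop := heights ≠ []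
instance (N : Int) (heights : List Int) : Decidable (Pre_solution N heights) := by unfold Pre_solution; infer_instance
def pvWitness_solution : Int × List Int := (3, [7, 7, 1])

def Spec_solution (N : Int) (heights : List Int) (out : Int) : Prop := out = solution_alt N heights
instance (N : Int) (heights : List Int) (out : Int) : Decidable (Spec_solution N heights out) := by unfold Spec_solution; infer_instance

-- ===== CLAIM (what is proved, stated in full; the proofs are below) =====
def Claim_equal_solution : Prop := ∀ (N : Int) (heights : List Int), Dom_solution N heights → Pre_solution N heights → Spec_solution N heights (solution N heights)

-- ===== LEMMAS AND PROOFS =====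

-- a list of non-negative needs: its sum is non-negative and bounds its count of odd entries
theorem needs_bounds (xs : List Int) (hnn : ∀ x ∈ xs, 0 ≤ x) :
    0 ≤ xs.sum ∧ ((xs.countP (fun x => PySem.Int.mod x 2 == 1)) : Int) ≤ xs.sum := by
  induction xs with
  | nil => simp
  | cons x t ih =>
    have hx : 0 ≤ x := hnn x (by simp)
    have iht := ih (fun y hy => hnn y (by simp [hy]))
    have hmd := PySem.Int.floordiv_mul_add_mod x 2
    have h0 : 0 ≤ PySem.Int.mod x 2 := PySem.Int.mod_nonneg x (by omega)
    have h2 : PySem.Int.mod x 2 < 2 := PySem.Int.mod_lt x (by omega)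
    rw [List.sum_cons]
    by_cases hodd : PySem.Int.mod x 2 = 1
    · rw [List.countP_cons_of_pos (by rw [hodd]; decide)]
      push_cast
      omega
    · rw [List.countP_cons_of_neg (by rw [show PySem.Int.mod x 2 = 0 by omega]; decide)]
      omega

-- B's fold computes (total need, count of odd needs)
theorem foldB_eq (m : Int) (hs : List Int) : ∀ a b : Int,
    hs.foldl (fun (p : Int × Int) h => (p.1 + (m - h), p.2 + PySem.Int.band (m - h) 1)) (a, b)
    = (a + (hs.map (fun h => m - h)).sum,
       b + ((hs.map (fun h => m - h)).countP (fun x => PySem.Int.mod x 2 == 1) : Int)) := by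
  induction hs with
  | nil => intro a b; simp
  | cons h t ih =>
    intro a b
    have hb1 : PySem.Int.band (m - h) 1 = PySem.Int.mod (m - h) 2 := PySem.Int.band_one _
    have h0 : 0 ≤ PySem.Int.mod (m - h) 2 := PySem.Int.mod_nonneg _ (by omega)
    have h2 : PySem.Int.mod (m - h) 2 < 2 := PySem.Int.mod_lt _ (by omega)
    rw [List.foldl_cons, ih, List.map_cons, List.sum_cons, Prod.mk.injEq]
    by_cases hodd : PySem.Int.mod (m - h) 2 = 1
    · rw [List.countP_cons_of_pos (by rw [hodd]; decide), hb1, hodd]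
      constructor <;> (push_cast; ring)
    · have hz : PySem.Int.mod (m - h) 2 = 0 := by omega
      rw [List.countP_cons_of_neg (by rw [hz]; decide), hb1, hz]
      constructor <;> (push_cast; ring)

-- dropping the h = max entries (their need is 0) changes neither the total nor the odd count
theorem A_needs_eq (m : Int) (hs : List Int) :
    ((hs.filter (fun h => h != m)).map (fun h => m - h)).sum = (hs.map (fun h => m - h)).sum
  ∧ ((hs.filter (fun h => h != m)).map (fun h => m - h)).countP (fun x => PySem.Int.mod x 2 == 1)
      = (hs.map (fun h => m - h)).countP (fun x => PySem.Int.mod x 2 == 1) := by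
  induction hs with
  | nil => simp
  | cons h t ih =>
    by_cases he : h = m
    · subst he
      have hz : PySem.Int.mod (h - h) 2 = 0 := by simp [PySem.Int.mod]
      rw [List.filter_cons]
      simp only [bne_self_eq_false, Bool.false_eq_true, if_false, List.map_cons, List.sum_cons]
      rw [List.countP_cons_of_neg (by rw [hz]; decide)]
      exact ⟨by rw [ih.1]; omega, ih.2⟩
    · rw [List.filter_cons]
      simp only [show ((h != m) : Bool) = true by rw [bne_iff_ne]; exact he, if_true,
        List.map_cons, List.sum_cons, List.countP_cons]
      rw [ih.1, ih.2]
      exact ⟨rfl, rfl⟩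

-- A's per-day capacity test is a threshold at d0 = 2q + r, where S = 3q + r, 0 ≤ r < 3
theorem cap_iff (S q r day : Int) (hqr : q * 3 + r = S) (hr0 : 0 ≤ r) (hr3 : r < 3) :
    ((PySem.Int.floordiv day 2) * 2 +
      (if PySem.Int.mod day 2 = 0 then PySem.Int.floordiv day 2 else PySem.Int.floordiv day 2 + 1) * 1 ≥ S)
    ↔ 2 * q + r ≤ day := by
  have hmd := PySem.Int.floordiv_mul_add_mod day 2
  have h0 : 0 ≤ PySem.Int.mod day 2 := PySem.Int.mod_nonneg _ (by omega)
  have h2 : PySem.Int.mod day 2 < 2 := PySem.Int.mod_lt _ (by omega)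
  split_ifs with ht <;> omega

-- scanning [lo, hi] with a threshold-at-d0 predicate returns max lo d0 (when d0 ≤ hi)
theorem loop_finds (S d0 hi : Int)
    (hpred : ∀ day, ((PySem.Int.floordiv day 2) * 2 +
      (if PySem.Int.mod day 2 = 0 then PySem.Int.floordiv day 2 else PySem.Int.floordiv day 2 + 1) * 1 ≥ S)
      ↔ d0 ≤ day)
    (hd0 : d0 ≤ hi) :
    ∀ (n : Nat) (lo : Int), (d0 - lo).toNat ≤ n → lo ≤ hi →
      solutionLoopA S (PySem.List.pyRange lo (hi + 1) 1) = max lo d0 := by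
  intro n
  induction n with
  | zero =>
    intro lo hn hlo
    have hged : d0 ≤ lo := by omega
    rw [PySem.List.pyRange_one_cons (by omega)]
    simp only [solutionLoopA]
    rw [if_pos ((hpred lo).mpr hged)]
    omega
  | succ k ih =>
    intro lo hn hlo
    rw [PySem.List.pyRange_one_cons (by omega)]
    simp only [solutionLoopA]
    by_cases hc : (PySem.Int.floordiv lo 2) * 2 +
      (if PySem.Int.mod lo 2 = 0 then PySem.Int.floordiv lo 2 else PySem.Int.floordiv lo 2 + 1) * 1 ≥ S
    · rw [if_pos hc]
      have := (hpred lo).mp hc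
      omega
    · rw [if_neg hc]
      have hlt : lo < d0 := by
        by_contra h
        exact hc ((hpred lo).mpr (by omega))
      rw [ih (lo + 1) (by omega) (by omega)]
      omega

-- A's scan from 2O-1 to 2S-1 equals B's closed form, given 0 ≤ O ≤ S
theorem core_scan_eq (S O : Int) (hS0 : 0 ≤ S) (hO0 : 0 ≤ O) (hOS : O ≤ S) :
    solutionLoopA S (PySem.List.pyRange (O * 2 - 1) (S * 2 - 1 + 1) 1)
    = if S = 0 then 0
      else max (2 * PySem.Int.floordiv S 3 + PySem.Int.mod S 3) (2 * O - 1) := by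
  by_cases hSz : S = 0
  · subst hSz
    have : O = 0 := by omega
    subst this
    decide
  · rw [if_neg hSz]
    have hqr := PySem.Int.floordiv_mul_add_mod S 3
    have hr0 : 0 ≤ PySem.Int.mod S 3 := PySem.Int.mod_nonneg _ (by omega)
    have hr3 : PySem.Int.mod S 3 < 3 := PySem.Int.mod_lt _ (by omega)
    set q := PySem.Int.floordiv S 3
    set r := PySem.Int.mod S 3
    have hq0 : 0 ≤ q := by omega
    rw [loop_finds S (2 * q + r) (S * 2 - 1)
      (fun day => cap_iff S q r day hqr hr0 hr3) (by omega)
      (2 * q + r - (O * 2 - 1)).toNat (O * 2 - 1) (by omega) (by omega)]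
    omega

theorem solution_eq (N : Int) (heights : List Int) (hne : heights ≠ []) :
    solution N heights = solution_alt N heights := by
  obtain ⟨m, hm⟩ : ∃ m, PySem.List.max? heights (fun x => x) = some m := by
    cases hmx : PySem.List.max? heights (fun x => x) with
    | none => exact absurd ((PySem.List.max?_eq_none_iff heights _).mp hmx) hne
    | some m => exact ⟨m, rfl⟩
  have hle : ∀ h ∈ heights, h ≤ m := by
    have := PySem.List.max?_isMax hm
    simpa using this
  have hnn : ∀ x ∈ heights.map (fun h => m - h), 0 ≤ x := by
    intro x hx
    obtain ⟨h, hh, rfl⟩ := List.mem_map.mp hx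
    have := hle h hh
    omega
  have hbnd := needs_bounds (heights.map (fun h => m - h)) hnn
  unfold solution solution_alt
  rw [hm]
  simp only [← List.countP_eq_length_filter, foldB_eq, (A_needs_eq m heights).1,
    (A_needs_eq m heights).2, zero_add]
  exact core_scan_eq _ _ hbnd.1 (by positivity) hbnd.2

-- ===== VERDICT (by name: the statement is the Claim_ definition above) =====
theorem solution_spec : Claim_equal_solution := by
  intro N heights _ hpre
  exact solution_eq N heights hpre
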